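-- pv_equiv track=rewrite | github.com/Udit107710/CodeChef | CodeChef/FEB20B/THEATRE/solution.py | calculate
-- ===== SOURCE A (Python) =====
-- def calculate(arr, p, q, s, c, m):
--     if c > 0:
--         for i in range(4):
--             for j in range(4):
--                 if (i not in p) and (j not in q):
--                     if arr[i][j] == 0:
--                         s-=100
--                     else:
--                         s+=c*arr[i][j]
--                     c-=25
--                     q.append(j)
--                     p.append(i)
--                     ans = calculate(arr, p, q, s, c, m)
--                     c+=25
--                     if arr[i][j] == 0:
--                         s+=100
--                     else:
--                         s-=c*arr[i][j]
--                     if p: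
--                         p.pop(-1)
--                     if q:
--                         q.pop(-1)
--                     if ans > m:
--                         m = ans
--         return m
--     else:
--         return s
-- ===== SOURCE B (Python) =====
-- def _perms(items, k):
--     # all length-k permutations of items, built breadth-first as (chosen, remaining) states
--     states = [([], items)]
--     for _ in range(k):
--         states = [(chosen + [x], rest[:idx] + rest[idx + 1:])
--                   for chosen, rest in states
--                   for idx, x in enumerate(rest)]
--     return [chosen for chosen, _ in states]
--
--
-- def calculate(arr, p, q, s, c, m):
--     if c <= 0:
--         return s
--     k = -((-c) // 25)  # number of seats still to fill = ceil(c / 25)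
--     rows = [i for i in range(4) if i not in p]
--     cols = [j for j in range(4) if j not in q]
--     if k > len(rows) or k > len(cols):
--         return m
--     best = m
--     for rseq in _perms(rows, k):
--         for cseq in _perms(cols, k):
--             sc = s
--             w = c
--             for i, j in zip(rseq, cseq):
--                 v = arr[i][j]
--                 sc += -100 if v == 0 else w * v
--                 w -= 25
--             if sc > best:
--                 best = sc
--     return best
-- ===== Notes on version B (the rewrite author's own statement) =====
-- stated objective: alternative
-- what changed: Replaces A's recursive backtracking with in-place mutation of p/q by a direct enumeration: compute k = ceil(c/25), list the free rows and columns, generate all k-permutations of each breadth-first, score each row-permutation/column-permutation pairing in one linear pass, and take the max against m (returning m outright when k exceeds the free rows or columns).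
import Mathlib
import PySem

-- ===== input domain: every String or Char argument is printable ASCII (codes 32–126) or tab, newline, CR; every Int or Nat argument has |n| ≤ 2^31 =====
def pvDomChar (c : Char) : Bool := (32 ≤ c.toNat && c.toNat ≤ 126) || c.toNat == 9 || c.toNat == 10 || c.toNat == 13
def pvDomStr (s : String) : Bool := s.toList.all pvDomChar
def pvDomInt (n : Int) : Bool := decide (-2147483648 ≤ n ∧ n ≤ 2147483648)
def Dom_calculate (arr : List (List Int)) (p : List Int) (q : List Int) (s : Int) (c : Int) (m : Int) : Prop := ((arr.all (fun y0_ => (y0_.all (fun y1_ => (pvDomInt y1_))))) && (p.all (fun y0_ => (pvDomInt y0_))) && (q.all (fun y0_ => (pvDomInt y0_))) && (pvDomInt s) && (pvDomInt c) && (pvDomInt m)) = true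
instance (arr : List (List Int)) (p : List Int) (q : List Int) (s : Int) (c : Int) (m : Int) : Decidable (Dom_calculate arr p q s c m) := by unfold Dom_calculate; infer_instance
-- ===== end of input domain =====

-- B replaces A's mutate-and-backtrack recursion by a direct enumeration of row/column
-- k-permutations, scored in one pass (objective: alternative, same cost on the fixed 4x4 grid).
-- A mutates p and q during the search but restores them before returning, so there is no
-- observable side effect to mirror.

-- ===== PORT A =====
-- Fuel: each recursive call appends a fresh i ∈ range(4) to p, so the recursion depth is at
-- most 5; fuel 5 is never exhausted (the fuel-0 branch is unreachable from `calculate`).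
def calcAux : Nat → List (List Int) → List Int → List Int → Int → Int → Int → Int
  | 0, _, _, _, _, _, _ => 0
  | fuel+1, arr, p, q, s, c, m =>
    if 0 < c then
      (PySem.List.pyRange 0 4 1).foldl (fun m1 i =>
        (PySem.List.pyRange 0 4 1).foldl (fun m2 j =>
          if i ∉ p ∧ j ∉ q then
            let v := ((PySem.List.pyGet? arr i).bind fun row => PySem.List.pyGet? row j).getD 0
            let s' := if v = 0 then s - 100 else s + c * v
            let ans := calcAux fuel arr (p ++ [i]) (q ++ [j]) s' (c - 25) m2
            if ans > m2 then ans else m2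
          else m2) m1) m
    else s

def calculate (arr : List (List Int)) (p : List Int) (q : List Int) (s : Int) (c : Int) (m : Int) : Int :=
  calcAux 5 arr p q s c m

-- ===== PORT B =====
-- _perms of Source B: breadth-first (chosen, remaining) states
def permsStep (states : List (List Int × List Int)) : List (List Int × List Int) :=
  states.flatMap fun st =>
    (PySem.List.enumerate st.2 0).map fun ix =>
      (st.1 ++ [ix.2], PySem.List.slice st.2 none (some ix.1) ++ PySem.List.slice st.2 (some (ix.1 + 1)) none)

def permsB (items : List Int) (k : Int) : List (List Int) :=
  ((PySem.List.pyRange 0 k 1).foldl (fun states _ => permsStep states) [([], items)]).map Prod.fst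

def calculate_alt (arr : List (List Int)) (p : List Int) (q : List Int) (s : Int) (c : Int) (m : Int) : Int :=
  if c ≤ 0 then s
  else
    let k : Int := -(PySem.Int.floordiv (-c) 25)
    let rows := (PySem.List.pyRange 0 4 1).filter fun i => decide (i ∉ p)
    let cols := (PySem.List.pyRange 0 4 1).filter fun j => decide (j ∉ q)
    if k > (rows.length : Int) ∨ k > (cols.length : Int) then m
    else
      (permsB rows k).foldl (fun best rseq =>
        (permsB cols k).foldl (fun best2 cseq =>
          let sw := (rseq.zip cseq).foldl (fun (acc : Int × Int) ij =>
            let v := ((PySem.List.pyGet? arr ij.1).bind fun row => PySem.List.pyGet? row ij.2).getD 0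
            (acc.1 + (if v = 0 then -100 else acc.2 * v), acc.2 - 25)) (s, c)
          if sw.1 > best2 then sw.1 else best2) best) m

-- ===== PRECONDITION & SPEC =====
-- Pre_ excludes exactly the inputs where Python A raises IndexError: when c > 0, A reads
-- arr[i][j] for every free row i and free column j, so all those lookups must be in range.
def Pre_calculate (arr : List (List Int)) (p : List Int) (q : List Int) (s : Int) (c : Int) (m : Int) : Prop :=
  c ≤ 0 ∨ ∀ i ∈ PySem.List.pyRange 0 4 1, i ∉ p → ∀ j ∈ PySem.List.pyRange 0 4 1, j ∉ q →
    ((PySem.List.pyGet? arr i).bind fun row => PySem.List.pyGet? row j) ≠ none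
instance (arr : List (List Int)) (p : List Int) (q : List Int) (s : Int) (c : Int) (m : Int) : Decidable (Pre_calculate arr p q s c m) := by unfold Pre_calculate; infer_instance

def pvWitness_calculate : List (List Int) × List Int × List Int × Int × Int × Int :=
  ([[1, 2, 0, 4], [5, 6, 7, 8], [9, 1, 2, 3], [4, 5, 6, 7]], [], [], 0, 50, 0)

def Spec_calculate (arr : List (List Int)) (p : List Int) (q : List Int) (s : Int) (c : Int) (m : Int) (out : Int) : Prop := out = calculate_alt arr p q s c m
instance (arr : List (List Int)) (p : List Int) (q : List Int) (s : Int) (c : Int) (m : Int) (out : Int) : Decidable (Spec_calculate arr p q s c m out) := by unfold Spec_calculate; infer_instance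

-- ===== CLAIM (what is proved, stated in full; the proofs are below) =====
def Claim_equal_calculate : Prop := ∀ (arr : List (List Int)) (p : List Int) (q : List Int) (s : Int) (c : Int) (m : Int), Dom_calculate arr p q s c m → Pre_calculate arr p q s c m → Spec_calculate arr p q s c m (calculate arr p q s c m)

-- ===== LEMMAS AND PROOFS =====

-- free rows (resp. columns): the i ∈ range(4) not blocked by p
def freeOf (p : List Int) : List Int := [0, 1, 2, 3].filter fun i => decide (i ∉ p)

-- the cell value read by both ports
def pick (arr : List (List Int)) (ij : Int × Int) : Int :=
  ((PySem.List.pyGet? arr ij.1).bind fun row => PySem.List.pyGet? row ij.2).getD 0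

-- score of a placement sequence, with the depth-dependent coefficient
def score (arr : List (List Int)) : Int → List (Int × Int) → Int
  | _, [] => 0
  | c, ij :: L => (if pick arr ij = 0 then -100 else c * pick arr ij) + score arr (c - 25) L

-- the complete placement sequences explored by A's backtracking
def seqs : Nat → List Int → List Int → Int → List (List (Int × Int))
  | 0, _, _, _ => []
  | fuel+1, p, q, c =>
    if 0 < c then
      [0, 1, 2, 3].flatMap fun i => [0, 1, 2, 3].flatMap fun j =>
        if i ∉ p ∧ j ∉ q then (seqs fuel (p ++ [i]) (q ++ [j]) (c - 25)).map ((i, j) :: ·) else []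
    else [[]]

-- number of placements a run of A performs: ceil(c/25), clamped at 0
def kC (c : Int) : Nat := (-(PySem.Int.floordiv (-c) 25)).toNat

lemma pyR4 : PySem.List.pyRange 0 4 1 = ([0, 1, 2, 3] : List Int) := by decide

lemma kC_pos {c : Int} (hc : 0 < c) : 0 < kC c := by
  unfold kC; rw [PySem.Int.floordiv_eq_ediv_of_pos (by norm_num)]; omega

lemma kC_succ {c : Int} (hc : 0 < c) : kC c = kC (c - 25) + 1 := by
  unfold kC
  rw [PySem.Int.floordiv_eq_ediv_of_pos (by norm_num), PySem.Int.floordiv_eq_ediv_of_pos (by norm_num)]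
  omega

lemma kC_nonpos {c : Int} (hc : ¬ 0 < c) : kC c = 0 := by
  unfold kC; rw [PySem.Int.floordiv_eq_ediv_of_pos (by norm_num)]; omega

-- max-fold toolkit
lemma le_foldl_max (l : List Int) : ∀ m : Int, m ≤ l.foldl max m := by
  induction l with
  | nil => intro m; simp
  | cons x xs ih => intro m; exact le_trans (le_max_left m x) (ih (max m x))

lemma foldl_max_of_mem (l : List Int) : ∀ (m x : Int), x ∈ l → x ≤ l.foldl max m := by
  induction l with
  | nil => intro m x hx; cases hx
  | cons y ys ih =>
    intro m x hx
    rcases List.mem_cons.1 hx with h | h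
    · subst h; exact le_trans (le_max_right m x) (le_foldl_max ys (max m x))
    · exact ih (max m y) x h

lemma foldl_max_le (l : List Int) : ∀ (m r : Int), m ≤ r → (∀ x ∈ l, x ≤ r) → l.foldl max m ≤ r := by
  induction l with
  | nil => intro m r h _; simpa using h
  | cons y ys ih =>
    intro m r h hall
    exact ih (max m y) r (max_le h (hall y List.mem_cons_self)) fun x hx => hall x (List.mem_cons_of_mem _ hx)

lemma foldl_max_congr_mem (l1 l2 : List Int) (m : Int) (h : ∀ x, x ∈ l1 ↔ x ∈ l2) :
    l1.foldl max m = l2.foldl max m := by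
  apply le_antisymm
  · exact foldl_max_le l1 m _ (le_foldl_max l2 m) fun x hx => foldl_max_of_mem l2 m x ((h x).1 hx)
  · exact foldl_max_le l2 m _ (le_foldl_max l1 m) fun x hx => foldl_max_of_mem l1 m x ((h x).2 hx)

lemma foldl_foldl_max {α : Type} (l : List α) (g : α → List Int) : ∀ m : Int,
    l.foldl (fun acc x => (g x).foldl max acc) m = (l.flatMap g).foldl max m := by
  induction l with
  | nil => intro m; simp
  | cons x xs ih => intro m; simp [List.foldl_append, ih]

lemma ite_gt_max (a b : Int) : (if a > b then a else b) = max b a := by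
  split <;> omega

-- free-list facts
lemma freeOf_mem (p : List Int) (x : Int) : x ∈ freeOf p ↔ x ∈ ([0,1,2,3] : List Int) ∧ x ∉ p := by
  simp [freeOf, List.mem_filter]

lemma freeOf_append_mem (p : List Int) (i x : Int) : x ∈ freeOf (p ++ [i]) ↔ x ∈ freeOf p ∧ x ≠ i := by
  simp only [freeOf, List.mem_filter, List.mem_append, List.mem_singleton, decide_eq_true_eq]
  tauto

lemma freeOf_nodup (p : List Int) : (freeOf p).Nodup :=
  List.Nodup.filter _ (by decide)

lemma freeOf_len_le (p : List Int) : (freeOf p).length ≤ 4 :=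
  le_trans (List.length_filter_le _ _) (by decide)

lemma length_filter_mono {α : Type} (l : List α) (f g : α → Bool)
    (h : ∀ x, f x = true → g x = true) : (l.filter f).length ≤ (l.filter g).length := by
  induction l with
  | nil => simp
  | cons x xs ih =>
    rw [List.filter_cons, List.filter_cons]
    cases hf : f x
    · cases hg : g x <;> simp <;> omega
    · rw [h x hf]; simpa using ih

lemma length_filter_lt {α : Type} (l : List α) (f g : α → Bool)
    (h : ∀ x, f x = true → g x = true) (i : α) (hi : i ∈ l) (hgi : g i = true) (hfi : f i = false) :
    (l.filter f).length < (l.filter g).length := by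
  induction l with
  | nil => cases hi
  | cons x xs ih =>
    rw [List.filter_cons, List.filter_cons]
    rcases List.mem_cons.1 hi with rfl | hmem
    · rw [hfi, hgi]
      simpa using Nat.lt_succ_of_le (length_filter_mono xs f g h)
    · cases hf : f x
      · cases hg : g x
        · simpa using ih hmem
        · simpa using Nat.lt_succ_of_le (Nat.le_of_lt (ih hmem))
      · rw [h x hf]
        simpa using ih hmem

lemma freeOf_append_len (p : List Int) (i : Int) (hi : i ∈ freeOf p) :
    (freeOf (p ++ [i])).length < (freeOf p).length := by
  have hi' := (freeOf_mem p i).1 hi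
  apply length_filter_lt
  · intro x hx
    simp only [decide_eq_true_eq, List.mem_append] at hx ⊢
    tauto
  · exact hi'.1
  · simpa using hi'.2
  · simp [List.mem_append]

-- A's fold equals a max-fold over the scored complete sequences
lemma calcAux_eq (fuel : Nat) : ∀ (arr : List (List Int)) (p q : List Int) (s c m : Int),
    (freeOf p).length < fuel →
    calcAux fuel arr p q s c m =
      if 0 < c then ((seqs fuel p q c).map fun L => s + score arr c L).foldl max m else s := by
  induction fuel with
  | zero => intro arr p q s c m h; omega
  | succ f ih =>
    intro arr p q s c m hf
    by_cases hc : 0 < c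
    · have hlist : (([0,1,2,3] : List Int).flatMap fun i => ([0,1,2,3] : List Int).flatMap fun j =>
          if i ∉ p ∧ j ∉ q then
            (seqs f (p ++ [i]) (q ++ [j]) (c - 25)).map (fun L => s + score arr c ((i, j) :: L))
          else []) = (seqs (f+1) p q c).map fun L => s + score arr c L := by
        simp only [seqs, if_pos hc, List.map_flatMap]
        congr 1
        funext i
        congr 1
        funext j
        by_cases hcond : i ∉ p ∧ j ∉ q
        · rw [if_pos hcond, if_pos hcond, List.map_map]
          rfl
        · rw [if_neg hcond, if_neg hcond]
          rfl
      simp only [calcAux, pyR4, if_pos hc]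
      refine Eq.trans (PySem.List.foldl_congr_mem _ _
        (fun m1 i => (([0,1,2,3] : List Int).flatMap fun j =>
          if i ∉ p ∧ j ∉ q then
            (seqs f (p ++ [i]) (q ++ [j]) (c - 25)).map (fun L => s + score arr c ((i, j) :: L))
          else []).foldl max m1) _ ?_) ?_
      · intro m1 i hi
        refine Eq.trans (PySem.List.foldl_congr_mem _ _
          (fun m2 j => (if i ∉ p ∧ j ∉ q then
            (seqs f (p ++ [i]) (q ++ [j]) (c - 25)).map (fun L => s + score arr c ((i, j) :: L))
          else []).foldl max m2) _ ?_) (foldl_foldl_max _ _ m1)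
        intro m2 j hj
        dsimp only
        by_cases hcond : i ∉ p ∧ j ∉ q
        · rw [if_pos hcond, if_pos hcond]
          have hifree : i ∈ freeOf p := (freeOf_mem p i).2 ⟨hi, hcond.1⟩
          have hflen : (freeOf (p ++ [i])).length < f := by
            have h1 := freeOf_append_len p i hifree
            omega
          rw [ih arr (p ++ [i]) (q ++ [j]) _ (c - 25) m2 hflen]
          have hmap : ((seqs f (p ++ [i]) (q ++ [j]) (c - 25)).map fun L =>
              (if ((PySem.List.pyGet? arr i).bind fun row => PySem.List.pyGet? row j).getD 0 = 0
               then s - 100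
               else s + c * ((PySem.List.pyGet? arr i).bind fun row => PySem.List.pyGet? row j).getD 0)
              + score arr (c - 25) L)
              = ((seqs f (p ++ [i]) (q ++ [j]) (c - 25)).map fun L => s + score arr c ((i, j) :: L)) := by
            congr 1
            funext L
            simp only [score, pick]
            split <;> ring
          by_cases hc2 : 0 < c - 25
          · rw [if_pos hc2, hmap]
            have hle := le_foldl_max ((seqs f (p ++ [i]) (q ++ [j]) (c - 25)).map fun L =>
              s + score arr c ((i, j) :: L)) m2
            split <;> omega
          · rw [if_neg hc2]
            obtain ⟨f', rfl⟩ : ∃ f', f = f' + 1 := ⟨f - 1, by omega⟩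
            simp only [seqs, if_neg hc2, List.map_cons, List.map_nil, List.foldl_cons, List.foldl_nil]
            have hs : s + score arr c [(i, j)] =
                (if ((PySem.List.pyGet? arr i).bind fun row => PySem.List.pyGet? row j).getD 0 = 0
                 then s - 100
                 else s + c * ((PySem.List.pyGet? arr i).bind fun row => PySem.List.pyGet? row j).getD 0) := by
              simp only [score, pick]
              split <;> ring
            rw [← hs, ite_gt_max]
        · rw [if_neg hcond, if_neg hcond]
          simp
      · rw [foldl_foldl_max, hlist]
    · simp only [calcAux, if_neg hc]

-- membership characterisation of A's complete sequences
lemma seqs_mem (fuel : Nat) : ∀ (p q : List Int) (c : Int) (L : List (Int × Int)),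
    (freeOf p).length < fuel →
    (L ∈ seqs fuel p q c ↔
      (L.map Prod.fst).Nodup ∧ (L.map Prod.snd).Nodup ∧
      (∀ ij ∈ L, ij.1 ∈ freeOf p ∧ ij.2 ∈ freeOf q) ∧ L.length = kC c) := by
  induction fuel with
  | zero => intro p q c L h; omega
  | succ f ih =>
    intro p q c L hf
    by_cases hc : 0 < c
    · constructor
      · intro hL
        simp only [seqs, if_pos hc, List.mem_flatMap] at hL
        obtain ⟨i, hi4, j, hj4, hmem⟩ := hL
        by_cases hcond : i ∉ p ∧ j ∉ q
        · rw [if_pos hcond] at hmem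
          obtain ⟨L', hL', rfl⟩ := List.mem_map.1 hmem
          have hifree : i ∈ freeOf p := (freeOf_mem p i).2 ⟨hi4, hcond.1⟩
          have hjfree : j ∈ freeOf q := (freeOf_mem q j).2 ⟨hj4, hcond.2⟩
          have hflen : (freeOf (p ++ [i])).length < f := by
            have := freeOf_append_len p i hifree; omega
          obtain ⟨hn1, hn2, hall, hlen⟩ := (ih (p ++ [i]) (q ++ [j]) (c - 25) L' hflen).1 hL'
          refine ⟨?_, ?_, ?_, ?_⟩
          · rw [List.map_cons, List.nodup_cons]
            refine ⟨fun hmemi => ?_, hn1⟩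
            obtain ⟨ij, hij, hij1⟩ := List.mem_map.1 hmemi
            exact ((freeOf_append_mem p i ij.1).1 (hall ij hij).1).2 hij1
          · rw [List.map_cons, List.nodup_cons]
            refine ⟨fun hmemj => ?_, hn2⟩
            obtain ⟨ij, hij, hij2⟩ := List.mem_map.1 hmemj
            exact ((freeOf_append_mem q j ij.2).1 (hall ij hij).2).2 hij2
          · intro ij hij
            rcases List.mem_cons.1 hij with rfl | hij'
            · exact ⟨hifree, hjfree⟩
            · exact ⟨((freeOf_append_mem p i ij.1).1 (hall ij hij').1).1,
                     ((freeOf_append_mem q j ij.2).1 (hall ij hij').2).1⟩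
          · rw [List.length_cons, hlen, kC_succ hc]
        · rw [if_neg hcond] at hmem
          cases hmem
      · rintro ⟨hn1, hn2, hall, hlen⟩
        have hk := kC_pos hc
        cases L with
        | nil => simp at hlen; omega
        | cons ij L' =>
          obtain ⟨i, j⟩ := ij
          have hhead := hall (i, j) List.mem_cons_self
          have hi4 := (freeOf_mem p i).1 hhead.1
          have hj4 := (freeOf_mem q j).1 hhead.2
          simp only [seqs, if_pos hc, List.mem_flatMap]
          refine ⟨i, hi4.1, j, hj4.1, ?_⟩
          rw [if_pos ⟨hi4.2, hj4.2⟩]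
          refine List.mem_map.2 ⟨L', ?_, rfl⟩
          have hflen : (freeOf (p ++ [i])).length < f := by
            have := freeOf_append_len p i hhead.1; omega
          rw [List.map_cons, List.nodup_cons] at hn1 hn2
          apply (ih (p ++ [i]) (q ++ [j]) (c - 25) L' hflen).2
          refine ⟨hn1.2, hn2.2, ?_, ?_⟩
          · intro ij' hij'
            have h' := hall ij' (List.mem_cons_of_mem _ hij')
            constructor
            · exact (freeOf_append_mem p i ij'.1).2
                ⟨h'.1, fun e => hn1.1 (List.mem_map.2 ⟨ij', hij', e⟩)⟩
            · exact (freeOf_append_mem q j ij'.2).2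
                ⟨h'.2, fun e => hn2.1 (List.mem_map.2 ⟨ij', hij', e⟩)⟩
          · rw [List.length_cons, kC_succ hc] at hlen
            omega
    · simp only [seqs, if_neg hc, List.mem_singleton]
      constructor
      · rintro rfl
        exact ⟨List.nodup_nil, List.nodup_nil, by simp, by simp [kC_nonpos hc]⟩
      · rintro ⟨-, -, -, hlen⟩
        rw [kC_nonpos hc] at hlen
        exact List.length_eq_zero_iff.1 hlen

-- B-side: the score loop
lemma bscore (arr : List (List Int)) : ∀ (L : List (Int × Int)) (s c : Int),
    (L.foldl (fun (acc : Int × Int) ij =>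
      (acc.1 + (if ((PySem.List.pyGet? arr ij.1).bind fun row => PySem.List.pyGet? row ij.2).getD 0 = 0
                 then -100
                 else acc.2 * ((PySem.List.pyGet? arr ij.1).bind fun row => PySem.List.pyGet? row ij.2).getD 0),
       acc.2 - 25)) (s, c)).1 = s + score arr c L := by
  intro L
  induction L with
  | nil => intro s c; simp [score]
  | cons ij L ih =>
    intro s c
    simp only [List.foldl_cons]
    rw [ih]
    simp only [score, pick]
    split <;> ring

-- B-side: the breadth-first permutation states
def OkSt (items : List Int) (n : Nat) (st : List Int × List Int) : Prop :=
  st.1.length = n ∧ st.1.Nodup ∧ (∀ x ∈ st.1, x ∈ items) ∧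
    st.2 = items.filter fun y => decide (y ∉ st.1)

lemma pyRange_len (k : Int) : (PySem.List.pyRange 0 k 1).length = k.toNat := by
  rw [PySem.List.pyRange_of_pos 0 k (by norm_num)]
  simp only [List.length_map, List.length_range]
  split <;> omega

lemma foldl_const_iter {α β : Type} (l : List α) (F : β → β) : ∀ init : β,
    l.foldl (fun st _ => F st) init = F^[l.length] init := by
  induction l with
  | nil => intro init; rfl
  | cons x xs ih => intro init; simp [List.foldl_cons, ih, Function.iterate_succ_apply]

lemma nodup_eraseIdx_eq (l : List Int) (hl : l.Nodup) (k : Nat) (hk : k < l.length) :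
    l.eraseIdx k = l.filter fun y => y != l[k] := by
  rw [← List.Nodup.erase_eq_filter hl]
  have hsplit : l = l.take k ++ l[k] :: l.drop (k + 1) := by
    conv_lhs => rw [← List.take_append_drop k l]
    rw [List.drop_eq_getElem_cons hk]
  have hnotin : l[k] ∉ l.take k := by
    intro hmem
    have hnd := hl
    rw [hsplit, List.nodup_append] at hnd
    exact hnd.2.2 _ hmem _ List.mem_cons_self rfl
  calc l.eraseIdx k = l.take k ++ l.drop (k + 1) := List.eraseIdx_eq_take_drop_succ l k
    _ = (l.take k ++ l[k] :: l.drop (k + 1)).erase l[k] := by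
        rw [List.erase_append_right _ hnotin, List.erase_cons_head]
    _ = l.erase l[k] := by rw [← hsplit]

lemma states_mem (items : List Int) (hit : items.Nodup) : ∀ (n : Nat) (st : List Int × List Int),
    st ∈ permsStep^[n] [([], items)] ↔ OkSt items n st := by
  intro n
  induction n with
  | zero =>
    intro st
    obtain ⟨a, b⟩ := st
    simp only [Function.iterate_zero, id_eq, List.mem_singleton, OkSt, Prod.mk.injEq]
    constructor
    · rintro ⟨rfl, rfl⟩
      exact ⟨rfl, List.nodup_nil, by simp, by simp⟩
    · rintro ⟨h1, -, -, h4⟩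
      have ha : a = [] := List.length_eq_zero_iff.1 h1
      subst ha
      refine ⟨rfl, ?_⟩
      simpa using h4
  | succ n ihn =>
    intro st'
    rw [Function.iterate_succ_apply']
    simp only [permsStep, List.mem_flatMap, List.mem_map]
    constructor
    · rintro ⟨st, hst, ix, hix, hst'⟩
      rw [PySem.List.mem_enumerate_iff] at hix
      obtain ⟨k, hk, rfl⟩ := hix
      obtain ⟨hl, hnd, hsub, hrest⟩ := (ihn st).1 hst
      have hnd2 : st.2.Nodup := by rw [hrest]; exact List.Nodup.filter _ hit
      obtain ⟨x, hxeq⟩ : ∃ x, st.2[k] = x := ⟨_, rfl⟩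
      have hx2 : x ∈ st.2 := hxeq ▸ List.getElem_mem hk
      have hxf : x ∈ items ∧ x ∉ st.1 := by
        rw [hrest] at hx2
        have := List.mem_filter.1 hx2
        exact ⟨this.1, by simpa using this.2⟩
      have hslice : PySem.List.slice st.2 none (some ((0:Int) + (k:Nat))) ++
          PySem.List.slice st.2 (some ((0:Int) + (k:Nat) + 1)) none = st.2.eraseIdx k := by
        have h1 : ((0:Int) + (k:Nat)) = ((k : Nat) : Int) := by push_cast; ring
        have h2 : (((k:Nat) : Int) + 1) = (((k + 1 : Nat)) : Int) := by push_cast; ring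
        rw [h1, PySem.List.slice_to_natCast, h2, PySem.List.slice_from_natCast,
          ← List.eraseIdx_eq_take_drop_succ]
      rw [← hst']
      rw [hxeq]
      refine ⟨by simp [hl], ?_, ?_, ?_⟩
      · show (st.1 ++ [x]).Nodup
        rw [List.nodup_append]
        refine ⟨hnd, List.nodup_singleton _, ?_⟩
        intro a ha b hb
        rw [List.mem_singleton] at hb
        subst hb
        exact fun e => hxf.2 (e ▸ ha)
      · intro y hy
        rcases List.mem_append.1 hy with h | h
        · exact hsub y h
        · rw [List.mem_singleton] at h; subst h; exact hxf.1
      · show PySem.List.slice st.2 none (some ((0:Int) + (k:Nat))) ++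
            PySem.List.slice st.2 (some ((0:Int) + (k:Nat) + 1)) none
            = items.filter fun y => decide (y ∉ st.1 ++ [x])
        rw [hslice, nodup_eraseIdx_eq st.2 hnd2 k hk, hxeq, hrest, List.filter_filter]
        apply List.filter_congr
        intro y hy
        by_cases h1 : y ∈ st.1 <;> by_cases h2 : y = x <;>
          simp [h1, h2, List.mem_append]
    · intro hok
      obtain ⟨a, b⟩ := st'
      obtain ⟨hl, hnd, hsub, hrest⟩ := hok
      simp only at hl hnd hsub hrest
      rcases List.eq_nil_or_concat a with rfl | ⟨M, x, rfl⟩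
      · simp at hl
      rw [List.concat_eq_append] at hl hnd hsub hrest ⊢
      have hndM : M.Nodup ∧ x ∉ M := by
        rw [List.nodup_append] at hnd
        exact ⟨hnd.1, fun hmem => hnd.2.2 x hmem x List.mem_cons_self rfl⟩
      have hxmem : x ∈ items.filter fun y => decide (y ∉ M) :=
        List.mem_filter.2 ⟨hsub x (List.mem_append_right _ List.mem_cons_self), by simpa using hndM.2⟩
      obtain ⟨k, hk, hxk⟩ := List.mem_iff_getElem.1 hxmem
      refine ⟨(M, items.filter fun y => decide (y ∉ M)), (ihn _).2 ?_, ?_⟩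
      · exact ⟨by simpa using hl, hndM.1, fun y hy => hsub y (List.mem_append_left _ hy), rfl⟩
      · refine ⟨((0:Int) + (k:Nat), (items.filter fun y => decide (y ∉ M))[k]), ?_, ?_⟩
        · rw [PySem.List.mem_enumerate_iff]
          exact ⟨k, hk, rfl⟩
        · have hslice : PySem.List.slice (items.filter fun y => decide (y ∉ M)) none (some ((0:Int) + (k:Nat))) ++
              PySem.List.slice (items.filter fun y => decide (y ∉ M)) (some ((0:Int) + (k:Nat) + 1)) none
              = (items.filter fun y => decide (y ∉ M)).eraseIdx k := by
            have h1 : ((0:Int) + (k:Nat)) = ((k : Nat) : Int) := by push_cast; ring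
            have h2 : (((k:Nat) : Int) + 1) = (((k + 1 : Nat)) : Int) := by push_cast; ring
            rw [h1, PySem.List.slice_to_natCast, h2, PySem.List.slice_from_natCast,
              ← List.eraseIdx_eq_take_drop_succ]
          refine Prod.ext ?_ ?_
          · show M ++ [(items.filter fun y => decide (y ∉ M))[k]] = M ++ [x]
            rw [hxk]
          · show PySem.List.slice (items.filter fun y => decide (y ∉ M)) none (some ((0:Int) + (k:Nat))) ++
                PySem.List.slice (items.filter fun y => decide (y ∉ M)) (some ((0:Int) + (k:Nat) + 1)) none = b
            rw [hslice, nodup_eraseIdx_eq _ (List.Nodup.filter _ hit) k hk, hxk, hrest,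
              List.filter_filter]
            apply List.filter_congr
            intro y hy
            by_cases h1 : y ∈ M <;> by_cases h2 : y = x <;>
              simp [h1, h2, List.mem_append]

lemma permsB_mem (items : List Int) (hit : items.Nodup) (k : Int) (M : List Int) :
    M ∈ permsB items k ↔ M.length = k.toNat ∧ M.Nodup ∧ ∀ x ∈ M, x ∈ items := by
  unfold permsB
  rw [foldl_const_iter, pyRange_len]
  simp only [List.mem_map]
  constructor
  · rintro ⟨st, hst, rfl⟩
    obtain ⟨h1, h2, h3, -⟩ := (states_mem items hit _ st).1 hst
    exact ⟨h1, h2, h3⟩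
  · rintro ⟨h1, h2, h3⟩
    exact ⟨(M, items.filter fun y => decide (y ∉ M)),
      (states_mem items hit _ _).2 ⟨h1, h2, h3, rfl⟩, rfl⟩

lemma zip_fst_snd {α β : Type} (L : List (α × β)) : (L.map Prod.fst).zip (L.map Prod.snd) = L := by
  induction L with
  | nil => rfl
  | cons x xs ih => simp [ih]

-- B's nested best-score folds, as a max-fold over the flattened score list
lemma alt_fold_eq (arr : List (List Int)) (s c m : Int) (R C : List (List Int)) :
    R.foldl (fun best rseq =>
      C.foldl (fun best2 cseq =>
        if (List.foldl (fun (acc : Int × Int) ij =>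
              (acc.1 + (if ((PySem.List.pyGet? arr ij.1).bind fun row => PySem.List.pyGet? row ij.2).getD 0 = 0
                        then -100
                        else acc.2 * ((PySem.List.pyGet? arr ij.1).bind fun row => PySem.List.pyGet? row ij.2).getD 0),
               acc.2 - 25)) (s, c) (rseq.zip cseq)).1 > best2
        then (List.foldl (fun (acc : Int × Int) ij =>
              (acc.1 + (if ((PySem.List.pyGet? arr ij.1).bind fun row => PySem.List.pyGet? row ij.2).getD 0 = 0
                        then -100
                        else acc.2 * ((PySem.List.pyGet? arr ij.1).bind fun row => PySem.List.pyGet? row ij.2).getD 0),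
               acc.2 - 25)) (s, c) (rseq.zip cseq)).1
        else best2) best) m
    = (R.flatMap fun rseq => C.map fun cseq => s + score arr c (rseq.zip cseq)).foldl max m := by
  rw [← foldl_foldl_max]
  apply PySem.List.foldl_congr_mem
  intro best rseq _
  dsimp only
  rw [List.foldl_map]
  apply PySem.List.foldl_congr_mem
  intro best2 cseq _
  dsimp only
  rw [bscore arr (rseq.zip cseq) s c, ite_gt_max]

-- ===== VERDICT (by name: the statement is the Claim_ definition above) =====
theorem calculate_spec : Claim_equal_calculate := by
  unfold Claim_equal_calculate
  intro arr p q s c m _hdom _hpre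
  unfold Spec_calculate
  show calcAux 5 arr p q s c m = calculate_alt arr p q s c m
  rw [calcAux_eq 5 arr p q s c m (by have := freeOf_len_le p; omega)]
  by_cases hc : 0 < c
  · rw [if_pos hc]
    simp only [calculate_alt, pyR4]
    rw [if_neg (show ¬ c ≤ 0 by omega)]
    rw [show (([0,1,2,3] : List Int).filter fun i => decide (i ∉ p)) = freeOf p from rfl]
    rw [show (([0,1,2,3] : List Int).filter fun j => decide (j ∉ q)) = freeOf q from rfl]
    by_cases hbig : (-(PySem.Int.floordiv (-c) 25)) > ((freeOf p).length : Int) ∨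
        (-(PySem.Int.floordiv (-c) 25)) > ((freeOf q).length : Int)
    · rw [if_pos hbig]
      have hempty : seqs 5 p q c = [] := by
        rw [List.eq_nil_iff_forall_not_mem]
        intro L hL
        obtain ⟨hn1, hn2, hall, hlen⟩ :=
          (seqs_mem 5 p q c L (by have := freeOf_len_le p; omega)).1 hL
        unfold kC at hlen
        rcases hbig with hb | hb
        · have hsubp : L.map Prod.fst ⊆ freeOf p := by
            intro x hx
            obtain ⟨ij, hij, rfl⟩ := List.mem_map.1 hx
            exact (hall ij hij).1
          have hle := (hn1.subperm hsubp).length_le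
          rw [List.length_map] at hle
          omega
        · have hsubq : L.map Prod.snd ⊆ freeOf q := by
            intro x hx
            obtain ⟨ij, hij, rfl⟩ := List.mem_map.1 hx
            exact (hall ij hij).2
          have hle := (hn2.subperm hsubq).length_le
          rw [List.length_map] at hle
          omega
      rw [hempty]
      simp
    · rw [if_neg hbig, alt_fold_eq]
      apply foldl_max_congr_mem
      intro x
      constructor
      · intro hx
        obtain ⟨L, hL, rfl⟩ := List.mem_map.1 hx
        obtain ⟨hn1, hn2, hall, hlen⟩ :=
          (seqs_mem 5 p q c L (by have := freeOf_len_le p; omega)).1 hL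
        refine List.mem_flatMap.2 ⟨L.map Prod.fst, ?_, ?_⟩
        · refine (permsB_mem _ (freeOf_nodup p) _ _).2 ⟨by rw [List.length_map]; exact hlen, hn1, ?_⟩
          intro y hy
          obtain ⟨ij, hij, rfl⟩ := List.mem_map.1 hy
          exact (hall ij hij).1
        · refine List.mem_map.2 ⟨L.map Prod.snd, ?_, ?_⟩
          · refine (permsB_mem _ (freeOf_nodup q) _ _).2 ⟨by rw [List.length_map]; exact hlen, hn2, ?_⟩
            intro y hy
            obtain ⟨ij, hij, rfl⟩ := List.mem_map.1 hy
            exact (hall ij hij).2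
          · rw [zip_fst_snd]
      · intro hx
        obtain ⟨r, hr, hx2⟩ := List.mem_flatMap.1 hx
        obtain ⟨cs, hcs, rfl⟩ := List.mem_map.1 hx2
        obtain ⟨hrl, hrn, hrs⟩ := (permsB_mem _ (freeOf_nodup p) _ _).1 hr
        obtain ⟨hcl, hcn, hcss⟩ := (permsB_mem _ (freeOf_nodup q) _ _).1 hcs
        refine List.mem_map.2 ⟨r.zip cs, ?_, rfl⟩
        apply (seqs_mem 5 p q c _ (by have := freeOf_len_le p; omega)).2
        refine ⟨?_, ?_, ?_, ?_⟩
        · rw [List.map_fst_zip (show r.length ≤ cs.length by omega)]; exact hrn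
        · rw [List.map_snd_zip (show cs.length ≤ r.length by omega)]; exact hcn
        · intro ij hij
          have := List.of_mem_zip hij
          exact ⟨hrs ij.1 this.1, hcss ij.2 this.2⟩
        · rw [List.length_zip]
          unfold kC
          omega
  · rw [if_neg hc]
    simp only [calculate_alt]
    rw [if_pos (show c ≤ 0 by omega)]
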